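-- pv_equiv track=rewrite | github.com/epfl-lasa/iiwa_ros | iiwa_tools/include/iiwa_tools/cvxgen/format_cvxgen.py | remove_ifdefs
-- ===== SOURCE A (Python) =====
-- def remove_ifdefs(data, label):
--     to_del = []
--
--     depth = 0
--     for k in range(len(data)):
--         line = data[k]
--         if line.startswith("#ifndef " + label) or line.startswith("#ifdef " + label):
--             depth = depth + 1
--         if depth > 0:
--             to_del.append(k)
--             if line.startswith("#endif"):
--                 depth = depth - 1
--
--     cdata = data
--     for i in range(len(to_del)):
--         del cdata[to_del[i]-i]
--     return cdata
-- ===== SOURCE B (Python) =====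
-- def remove_ifdefs(data, label):
--     # Single pass: track ifdef depth, keep only lines outside matching blocks.
--     # (Note: unlike A, B does not mutate `data` in place; return value is identical.)
--     ifndef = "#ifndef " + label
--     ifdef = "#ifdef " + label
--     out = []
--     depth = 0
--     for line in data:
--         if line.startswith(ifndef) or line.startswith(ifdef):
--             depth += 1
--         if depth > 0:
--             if line.startswith("#endif"):
--                 depth -= 1
--         else:
--             out.append(line)
--     return out
-- ===== Notes on version B (the rewrite author's own statement) =====
-- stated objective: faster
-- what changed: Instead of collecting indices to delete and then performing repeated in-place deletions (each O(n)), B filters in a single pass, tracking the ifdef depth and appending kept lines to a fresh list.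
import Mathlib
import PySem

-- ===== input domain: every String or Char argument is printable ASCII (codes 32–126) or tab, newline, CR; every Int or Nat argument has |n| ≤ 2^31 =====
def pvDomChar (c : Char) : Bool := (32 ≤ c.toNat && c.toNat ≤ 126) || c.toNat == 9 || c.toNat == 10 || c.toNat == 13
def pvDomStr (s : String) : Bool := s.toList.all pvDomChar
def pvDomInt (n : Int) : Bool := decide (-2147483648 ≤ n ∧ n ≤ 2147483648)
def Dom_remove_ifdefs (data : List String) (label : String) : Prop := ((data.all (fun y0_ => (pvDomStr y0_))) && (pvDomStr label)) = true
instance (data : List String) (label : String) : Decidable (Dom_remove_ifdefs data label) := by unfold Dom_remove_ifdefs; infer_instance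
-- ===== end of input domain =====

-- B replaces A's collect-indices-then-delete-one-by-one scheme (quadratic: each `del` shifts the tail)
-- by a single linear filtering pass tracking the ifdef depth; A mutates `data` in place (del), B does not —
-- the equivalence proved here is about the RETURN value.

-- ===== PORT A =====
-- Python `del xs[i]`: PySem.List.pop? discarding the value; none = IndexError (A only ever deletes in-range indices)
def pyDelete (xs : List String) (i : Int) : List String :=
  match PySem.List.pop? xs i with
  | some r => r.2
  | none => xs

def remove_ifdefs (data : List String) (label : String) : List String :=
  let fst := (PySem.List.pyRange 0 (PySem.List.len data) 1).foldl
    (fun (st : List Int × Int) k =>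
      let line := PySem.List.pyGetD data k ""   -- data[k]; k ∈ range(len(data)), always in range
      let depth := if PySem.Str.startswith line ("#ifndef " ++ label) || PySem.Str.startswith line ("#ifdef " ++ label) then st.2 + 1 else st.2
      if depth > 0 then
        (st.1 ++ [k], if PySem.Str.startswith line "#endif" then depth - 1 else depth)
      else
        (st.1, depth))
    ([], 0)
  let to_del := fst.1
  (PySem.List.pyRange 0 (PySem.List.len to_del) 1).foldl
    (fun cdata i => pyDelete cdata (PySem.List.pyGetD to_del i 0 - i)) data

-- ===== PORT B =====
def remove_ifdefs_alt (data : List String) (label : String) : List String :=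
  let ifndefP := "#ifndef " ++ label
  let ifdefP := "#ifdef " ++ label
  (data.foldl
    (fun (st : List String × Int) line =>
      let depth := if PySem.Str.startswith line ifndefP || PySem.Str.startswith line ifdefP then st.2 + 1 else st.2
      if depth > 0 then
        (st.1, if PySem.Str.startswith line "#endif" then depth - 1 else depth)
      else
        (st.1 ++ [line], depth))
    ([], 0)).1

-- ===== PRECONDITION & SPEC =====
def Spec_remove_ifdefs (data : List String) (label : String) (out : List String) : Prop := out = remove_ifdefs_alt data label
instance (data : List String) (label : String) (out : List String) : Decidable (Spec_remove_ifdefs data label out) := by unfold Spec_remove_ifdefs; infer_instance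

-- ===== CLAIM (what is proved, stated in full; the proofs are below) =====
def Claim_equal_remove_ifdefs : Prop := ∀ (data : List String) (label : String), Dom_remove_ifdefs data label → Spec_remove_ifdefs data label (remove_ifdefs data label)

-- ===== LEMMAS AND PROOFS =====

/-- Per-line depth increment of both programs. -/
def pvStep (label line : String) (d : Int) : Int :=
  if PySem.Str.startswith line ("#ifndef " ++ label) || PySem.Str.startswith line ("#ifdef " ++ label) then d + 1 else d

/-- `true` at the positions both programs drop, traversing with the shared depth automaton. -/
def pvMarks (label : String) (d : Int) : List String → List Bool
  | [] => []
  | line :: rest =>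
    if pvStep label line d > 0 then
      true :: pvMarks label (if PySem.Str.startswith line "#endif" then pvStep label line d - 1 else pvStep label line d) rest
    else false :: pvMarks label (pvStep label line d) rest

/-- Keep the elements marked `false`. -/
def pvKeep : List String → List Bool → List String
  | xs, [] => xs
  | [], _ :: _ => []
  | x :: xs, b :: bs => if b then pvKeep xs bs else x :: pvKeep xs bs

/-- Indices of the `true` marks. -/
def pvTrueIdx : List Bool → List Int
  | [] => []
  | b :: bs => (if b then [(0 : Int)] else []) ++ (pvTrueIdx bs).map (· + 1)

/-- A's second loop: at step `i` (shift `s + i`) delete position `js[i] - s - i`. -/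
def pvDelSeq : List String → List Int → Int → List String
  | xs, [], _ => xs
  | xs, j :: js, s => pvDelSeq (pyDelete xs (j - s)) js (s + 1)

theorem map_shift (t : List Int) (s : Int) : (t.map (· + 1)).map (· + s) = t.map (· + (s + 1)) := by
  simp only [List.map_map]
  apply List.map_congr_left
  intro a _
  simp only [Function.comp_apply]
  ring

theorem pyDelete_nil (i : Int) : pyDelete [] i = [] := by
  unfold pyDelete PySem.List.pop? PySem.List.pyIdx?
  split_ifs <;> simp_all

theorem pyDelete_zero_cons (x : String) (xs : List String) : pyDelete (x :: xs) 0 = xs := by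
  unfold pyDelete PySem.List.pop? PySem.List.pyIdx?
  norm_num

theorem pyDelete_cons_of_pos (x : String) (xs : List String) (i : Int) (h : 1 ≤ i) :
    pyDelete (x :: xs) i = x :: pyDelete xs (i - 1) := by
  unfold pyDelete PySem.List.pop? PySem.List.pyIdx?
  have h0 : (0:Int) ≤ i := by omega
  have h1 : (0:Int) ≤ i - 1 := by omega
  by_cases hlt : i < ((x :: xs).length : Int)
  · have h2 : i - 1 < (xs.length : Int) := by simp at hlt ⊢; omega
    have htn : i.toNat = (i - 1).toNat + 1 := by omega
    have hi : (i - 1).toNat < xs.length := by omega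
    rw [if_pos h0, if_pos hlt, if_pos h1, if_pos h2]
    simp only [Option.bind_some, htn, List.getElem?_cons_succ, List.eraseIdx_cons_succ,
      List.getElem?_eq_getElem hi, Option.map_some]
  · have h2 : ¬ (i - 1) < (xs.length : Int) := by simp at hlt ⊢; omega
    rw [if_pos h0, if_neg hlt, if_pos h1, if_neg h2]
    simp

theorem pvDelSeq_nil (js : List Int) (s : Int) : pvDelSeq [] js s = [] := by
  induction js generalizing s with
  | nil => rfl
  | cons j js ih => simp [pvDelSeq, pyDelete_nil, ih]

theorem pvDelSeq_shift (js : List Int) (xs : List String) (s : Int) :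
    pvDelSeq xs (js.map (· + 1)) (s + 1) = pvDelSeq xs js s := by
  induction js generalizing xs s with
  | nil => rfl
  | cons j js ih =>
    simp only [List.map_cons, pvDelSeq]
    rw [show j + 1 - (s + 1) = j - s by ring, ih]

theorem pvDelSeq_skip (js : List Int) (x : String) (xs : List String) (s : Int)
    (hp : js.Pairwise (· < ·)) (hb : ∀ j ∈ js, s + 1 ≤ j) :
    pvDelSeq (x :: xs) js s = x :: pvDelSeq xs (js.map (· - 1)) s := by
  induction js generalizing xs s with
  | nil => rfl
  | cons j js ih =>
    simp only [List.map_cons, pvDelSeq]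
    rw [pyDelete_cons_of_pos x xs (j - s) (by have := hb j (by simp); omega)]
    rw [show j - 1 - s = j - s - 1 by ring]
    exact ih (pyDelete xs (j - s - 1)) (s + 1) hp.of_cons
      (fun j' hj' => by
        have h1 := (List.pairwise_cons.mp hp).1 j' hj'
        have h2 := hb j (by simp)
        omega)

theorem pvTrueIdx_sorted (bs : List Bool) :
    (pvTrueIdx bs).Pairwise (· < ·) ∧ ∀ j ∈ pvTrueIdx bs, 0 ≤ j := by
  induction bs with
  | nil => simp [pvTrueIdx]
  | cons b bs ih =>
    obtain ⟨hp, hnn⟩ := ih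
    constructor
    · apply List.pairwise_append.mpr
      refine ⟨by cases b <;> simp, (List.pairwise_map).mpr (hp.imp (by intro a b h; omega)), ?_⟩
      intro a ha j hj
      simp only [List.mem_map] at hj
      obtain ⟨j', hj', rfl⟩ := hj
      have := hnn j' hj'
      cases b <;> simp_all
    · intro j hj
      simp only [pvTrueIdx, List.mem_append, List.mem_map] at hj
      rcases hj with hj | ⟨j', hj', rfl⟩
      · cases b <;> simp_all
      · have := hnn j' hj'; omega

theorem pvDelSeq_trueIdx (bs : List Bool) (xs : List String) :
    pvDelSeq xs (pvTrueIdx bs) 0 = pvKeep xs bs := by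
  induction bs generalizing xs with
  | nil => cases xs <;> rfl
  | cons b bs ih =>
    cases xs with
    | nil => simp [pvDelSeq_nil, pvKeep]
    | cons x xs =>
      obtain ⟨hp, hnn⟩ := pvTrueIdx_sorted bs
      cases b with
      | true =>
        show pvDelSeq (x :: xs) ([0] ++ (pvTrueIdx bs).map (· + 1)) 0 = pvKeep xs bs
        simp only [List.singleton_append, pvDelSeq]
        rw [show (0 : Int) - 0 = 0 by ring, pyDelete_zero_cons,
          show (0 : Int) + 1 = 0 + 1 by ring, pvDelSeq_shift, ih]
      | false =>
        show pvDelSeq (x :: xs) ([] ++ (pvTrueIdx bs).map (· + 1)) 0 = x :: pvKeep xs bs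
        simp only [List.nil_append]
        rw [pvDelSeq_skip _ x xs 0
          ((List.pairwise_map).mpr (hp.imp (by intro a b h; omega)))
          (fun j hj => by
            simp only [List.mem_map] at hj
            obtain ⟨j', hj', rfl⟩ := hj
            have := hnn j' hj'; omega)]
        rw [List.map_map]
        have hmm : (pvTrueIdx bs).map ((· - 1) ∘ (· + 1)) = pvTrueIdx bs := by
          simp [Function.comp_def]
        rw [hmm, ih]

/-- A's first loop, read over `enumerate`, with the absolute start index generalized. -/
theorem foldlA_enumerate (label : String) (xs : List String) (s : Int) (acc : List Int) (d : Int) :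
    ((PySem.List.enumerate xs s).foldl
      (fun (st : List Int × Int) (p : Int × String) =>
        let depth := if PySem.Str.startswith p.2 ("#ifndef " ++ label) || PySem.Str.startswith p.2 ("#ifdef " ++ label) then st.2 + 1 else st.2
        if depth > 0 then
          (st.1 ++ [p.1], if PySem.Str.startswith p.2 "#endif" then depth - 1 else depth)
        else (st.1, depth)) (acc, d)).1
    = acc ++ (pvTrueIdx (pvMarks label d xs)).map (· + s) := by
  induction xs generalizing s acc d with
  | nil => simp [PySem.List.enumerate, pvMarks, pvTrueIdx]
  | cons line rest ih =>
    have hstep : (if PySem.Str.startswith line ("#ifndef " ++ label) || PySem.Str.startswith line ("#ifdef " ++ label) then d + 1 else d) = pvStep label line d := rfl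
    simp only [PySem.List.enumerate, List.foldl_cons, hstep, pvMarks]
    by_cases hd : pvStep label line d > 0
    · rw [if_pos hd, if_pos hd, ih]
      simp only [pvTrueIdx, if_pos, List.map_cons, map_shift, List.append_assoc, List.cons_append, List.nil_append, zero_add]
    · rw [if_neg hd, if_neg hd, ih]
      simp only [pvTrueIdx, if_neg, List.nil_append, map_shift, Bool.false_eq_true, not_false_iff]

/-- A's second loop, read over `enumerate`, is `pvDelSeq`. -/
theorem foldlDel_enumerate (js : List Int) (xs : List String) (s : Int) :
    (PySem.List.enumerate js s).foldl
      (fun (cdata : List String) (p : Int × Int) => pyDelete cdata (p.2 - p.1)) xs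
    = pvDelSeq xs js s := by
  induction js generalizing xs s with
  | nil => rfl
  | cons j js ih => simp [PySem.List.enumerate, pvDelSeq, ih]

/-- B's loop computes `pvKeep` along `pvMarks`. -/
theorem foldlB (label : String) (xs : List String) (acc : List String) (d : Int) :
    (xs.foldl
      (fun (st : List String × Int) line =>
        let depth := if PySem.Str.startswith line ("#ifndef " ++ label) || PySem.Str.startswith line ("#ifdef " ++ label) then st.2 + 1 else st.2
        if depth > 0 then
          (st.1, if PySem.Str.startswith line "#endif" then depth - 1 else depth)
        else (st.1 ++ [line], depth)) (acc, d)).1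
    = acc ++ pvKeep xs (pvMarks label d xs) := by
  induction xs generalizing acc d with
  | nil => simp [pvMarks, pvKeep]
  | cons line rest ih =>
    have hstep : (if PySem.Str.startswith line ("#ifndef " ++ label) || PySem.Str.startswith line ("#ifdef " ++ label) then d + 1 else d) = pvStep label line d := rfl
    simp only [List.foldl_cons, hstep, pvMarks]
    by_cases hd : pvStep label line d > 0
    · rw [if_pos hd, if_pos hd, ih]
      simp [pvKeep]
    · rw [if_neg hd, if_neg hd, ih]
      simp [pvKeep, List.append_assoc]

theorem A_char (data : List String) (label : String) :
    remove_ifdefs data label = pvKeep data (pvMarks label 0 data) := by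
  have h := foldlA_enumerate label data 0 [] 0
  rw [PySem.List.enumerate_eq_map_pyRange data "", List.foldl_map] at h
  simp only [List.nil_append, add_zero, List.map_id'] at h
  have h2 := foldlDel_enumerate (pvTrueIdx (pvMarks label 0 data)) data 0
  rw [PySem.List.enumerate_eq_map_pyRange (pvTrueIdx (pvMarks label 0 data)) 0, List.foldl_map] at h2
  rw [pvDelSeq_trueIdx] at h2
  have hcong := congrArg (fun td : List Int => (PySem.List.pyRange 0 (PySem.List.len td) 1).foldl (fun cdata i => pyDelete cdata (PySem.List.pyGetD td i 0 - i)) data) h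
  simp only [] at hcong
  exact hcong.trans h2

theorem B_char (data : List String) (label : String) :
    remove_ifdefs_alt data label = pvKeep data (pvMarks label 0 data) := by
  have h := foldlB label data [] 0
  simp only [List.nil_append] at h
  exact h

-- ===== VERDICT (by name: the statement is the Claim_ definition above) =====
theorem remove_ifdefs_spec : Claim_equal_remove_ifdefs := by
  intro data label _
  show remove_ifdefs data label = remove_ifdefs_alt data label
  rw [A_char, B_char]
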